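-- pv_equiv track=rewrite | github.com/LimJH272/Advent-of-Code | 2025/solutions/day7.py | day7_part1
-- ===== SOURCE A (Python) =====
-- def day7_part1(start: int, splitters: list[int]) -> int:
--     curr = set([start])
--     count = 0
--
--     for row in splitters:
--         temp = set()
--         for loc in curr:
--             if loc in row:
--                 temp.update([loc-1, loc+1])
--                 count += 1
--             else:
--                 temp.add(loc)
--         curr = temp
--
--     return count
-- ===== SOURCE B (Python) =====
-- def day7_part1(start: int, splitters: list[int]) -> int:
--     # Depth-first search over the (row-index, position) state graph with a
--     # visited set, instead of simulating the frontier level by level: a state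
--     # (i, loc) leads to (i+1, loc-1) and (i+1, loc+1) if loc is a splitter of
--     # row i (counting one split), else to (i+1, loc).  The states reachable at
--     # depth i are exactly A's frontier before row i, so the number of visited
--     # splitting states equals A's count.
--     n = len(splitters)
--     rows = [set(row) for row in splitters]
--     seen = set()
--     count = 0
--     stack = [(0, start)]
--     while stack:
--         i, loc = stack.pop()
--         if (i, loc) in seen:
--             continue
--         seen.add((i, loc))
--         if i < n and loc in rows[i]:
--             count += 1
--             stack.append((i + 1, loc - 1))
--             stack.append((i + 1, loc + 1))
--         elif i < n:
--             stack.append((i + 1, loc))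
--     return count
-- ===== Notes on version B (the rewrite author's own statement) =====
-- stated objective: alternative
-- what changed: Replaces the level-synchronous frontier simulation (rebuild the set of positions row by row) with an explicit-stack depth-first search over the (row-index, position) state graph with a visited set, counting visited splitting states.
import Mathlib
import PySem

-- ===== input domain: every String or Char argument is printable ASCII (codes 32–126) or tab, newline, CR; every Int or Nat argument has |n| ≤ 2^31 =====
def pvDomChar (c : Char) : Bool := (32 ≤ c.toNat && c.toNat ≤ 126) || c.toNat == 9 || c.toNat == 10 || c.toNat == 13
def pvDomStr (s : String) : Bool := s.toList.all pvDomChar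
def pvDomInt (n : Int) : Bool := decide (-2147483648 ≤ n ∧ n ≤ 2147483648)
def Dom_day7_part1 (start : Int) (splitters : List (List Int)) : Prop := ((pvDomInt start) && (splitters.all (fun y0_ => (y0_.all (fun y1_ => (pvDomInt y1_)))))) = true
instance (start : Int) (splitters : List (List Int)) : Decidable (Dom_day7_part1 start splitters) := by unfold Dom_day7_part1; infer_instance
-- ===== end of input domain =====

-- B replaces A's level-by-level frontier simulation with an explicit-stack
-- depth-first search over the (row-index, position) state graph with a visited
-- set; objective: alternative algorithm (no speed claim).

-- ===== PORT A =====
-- A's inner loop body: process one frontier position.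
def innerA (row : List Int) (p : PySem.Set Int × Int) (loc : Int) : PySem.Set Int × Int :=
  if row.contains loc then (PySem.Set.update p.1 [loc - 1, loc + 1], p.2 + 1)
  else (PySem.Set.add p.1 loc, p.2)

-- A's per-row pass: fold the inner loop over curr, starting from temp = set().
def stepA (st : PySem.Set Int × Int) (row : List Int) : PySem.Set Int × Int :=
  st.1.foldl (innerA row) (PySem.Set.empty, st.2)

def day7_part1 (start : Int) (splitters : List (List Int)) : Int :=
  (splitters.foldl stepA (PySem.Set.ofList [start], 0)).2

-- ===== PORT B =====
-- B's while-loop; fuel is a totality guard only, proven sufficient below.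
def altLoop (rows : List (PySem.Set Int)) : Nat → List (Nat × Int) → PySem.Set (Nat × Int) → Int → Int
  | 0, _, _, count => count
  | _ + 1, [], _, count => count
  | fuel + 1, (i, loc) :: rest, seen, count =>
    if (i, loc) ∈ seen then altLoop rows fuel rest seen count
    else
      if i < rows.length then
        if loc ∈ rows.getD i PySem.Set.empty then
          altLoop rows fuel ((i + 1, loc + 1) :: (i + 1, loc - 1) :: rest)
            (PySem.Set.add seen (i, loc)) (count + 1)
        else
          altLoop rows fuel ((i + 1, loc) :: rest) (PySem.Set.add seen (i, loc)) count
      else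
        altLoop rows fuel rest (PySem.Set.add seen (i, loc)) count

def day7_part1_alt (start : Int) (splitters : List (List Int)) : Int :=
  let n := splitters.length
  let rows := splitters.map (fun row => PySem.Set.ofList row)
  -- fuel: each of the ≤ (n+1)² reachable states is pushed at most twice (+1 initial push)
  altLoop rows (2 * ((n + 1) * (n + 1)) + 1) [((0 : Nat), start)] PySem.Set.empty 0

-- ===== PRECONDITION & SPEC =====
def Spec_day7_part1 (start : Int) (splitters : List (List Int)) (out : Int) : Prop := out = day7_part1_alt start splitters
instance (start : Int) (splitters : List (List Int)) (out : Int) : Decidable (Spec_day7_part1 start splitters out) := by unfold Spec_day7_part1; infer_instance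

-- ===== CLAIM (what is proved, stated in full; the proofs are below) =====
def Claim_equal_day7_part1 : Prop := ∀ (start : Int) (splitters : List (List Int)), Dom_day7_part1 start splitters → Spec_day7_part1 start splitters (day7_part1 start splitters)

-- ===== LEMMAS AND PROOFS =====

-- Proof-side vocabulary: frontier F, weights, reachable states RR, successors.
def rowOf (splitters : List (List Int)) (i : Nat) : List Int := splitters.getD i []

def F (start : Int) (splitters : List (List Int)) : Nat → PySem.Set Int
  | 0 => PySem.Set.ofList [start]
  | i + 1 => (stepA (F start splitters i, 0) (rowOf splitters i)).1

def hits (start : Int) (splitters : List (List Int)) (i : Nat) : Int :=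
  (((F start splitters i).filter (fun loc => (rowOf splitters i).contains loc)).length : Int)

def wt (splitters : List (List Int)) (u : Nat × Int) : Int :=
  if u.1 < splitters.length ∧ u.2 ∈ rowOf splitters u.1 then 1 else 0

def RR (start : Int) (splitters : List (List Int)) : List (Nat × Int) :=
  (List.range (splitters.length + 1)).flatMap (fun i => (F start splitters i).map (fun loc => (i, loc)))

def succs (splitters : List (List Int)) (u : Nat × Int) : List (Nat × Int) :=
  if u.1 < splitters.length then
    (if u.2 ∈ rowOf splitters u.1 then [(u.1 + 1, u.2 - 1), (u.1 + 1, u.2 + 1)] else [(u.1 + 1, u.2)])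
  else []

def LoopInv (start : Int) (splitters : List (List Int))
    (stack : List (Nat × Int)) (seen : PySem.Set (Nat × Int)) : Prop :=
  (∀ u ∈ seen, u ∈ RR start splitters) ∧
  (∀ u ∈ stack, u ∈ RR start splitters) ∧
  (∀ u ∈ seen, ∀ v ∈ succs splitters u, v ∈ seen ∨ v ∈ stack) ∧
  (((0 : Nat), start) ∈ seen ∨ ((0 : Nat), start) ∈ stack) ∧
  seen.Nodup

def rem (start : Int) (splitters : List (List Int)) (seen : List (Nat × Int)) : Int :=
  (((RR start splitters).filter (fun u => decide (u ∉ seen))).map (wt splitters)).sum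

-- ---- A-side fold lemmas ----
theorem innerA_snd (row : List Int) (s : List Int) (p : PySem.Set Int × Int) :
    (s.foldl (innerA row) p).2 = p.2 + ((s.filter (fun loc => row.contains loc)).length : Int) := by
  induction s generalizing p with
  | nil => simp
  | cons x xs ih =>
    simp only [List.foldl_cons]
    rw [ih]
    by_cases h : x ∈ row
    · simp [innerA, h]
      ring
    · simp [innerA, h]

theorem innerA_fst_nodup (row : List Int) (s : List Int) (p : PySem.Set Int × Int)
    (hp : p.1.Nodup) : (s.foldl (innerA row) p).1.Nodup := by
  induction s generalizing p with
  | nil => simpa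
  | cons y ys ih =>
    simp only [List.foldl_cons]
    by_cases h : y ∈ row
    · rw [show innerA row p y = (PySem.Set.update p.1 [y - 1, y + 1], p.2 + 1) by
        simp [innerA, h]]
      exact ih _ (PySem.Set.nodup_update _ _ hp)
    · rw [show innerA row p y = (PySem.Set.add p.1 y, p.2) by simp [innerA, h]]
      exact ih _ (PySem.Set.nodup_add _ _ hp)

theorem innerA_fst_mem (row : List Int) (s : List Int) (p : PySem.Set Int × Int) (x : Int) :
    (x ∈ (s.foldl (innerA row) p).1)
      ↔ x ∈ p.1 ∨ (∃ loc ∈ s, loc ∈ row ∧ (x = loc - 1 ∨ x = loc + 1))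
          ∨ (x ∈ s ∧ x ∉ row) := by
  induction s generalizing p with
  | nil => simp
  | cons y ys ih =>
    simp only [List.foldl_cons]
    rw [ih]
    by_cases h : y ∈ row
    · rw [show innerA row p y = (PySem.Set.update p.1 [y - 1, y + 1], p.2 + 1) by
        simp [innerA, h]]
      simp only [PySem.Set.mem_update, List.mem_cons, List.not_mem_nil, or_false]
      constructor
      · rintro ((hx | (rfl | rfl)) | ⟨l, hl, hlr, hx⟩ | ⟨hx, hnr⟩)
        · exact Or.inl hx
        · exact Or.inr (Or.inl ⟨y, Or.inl rfl, h, Or.inl rfl⟩)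
        · exact Or.inr (Or.inl ⟨y, Or.inl rfl, h, Or.inr rfl⟩)
        · exact Or.inr (Or.inl ⟨l, Or.inr hl, hlr, hx⟩)
        · exact Or.inr (Or.inr ⟨Or.inr hx, hnr⟩)
      · rintro (hx | ⟨l, (rfl | hl), hlr, hx⟩ | ⟨(rfl | hx), hnr⟩)
        · exact Or.inl (Or.inl hx)
        · exact Or.inl (Or.inr hx)
        · exact Or.inr (Or.inl ⟨l, hl, hlr, hx⟩)
        · exact absurd h hnr
        · exact Or.inr (Or.inr ⟨hx, hnr⟩)
    · rw [show innerA row p y = (PySem.Set.add p.1 y, p.2) by simp [innerA, h]]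
      simp only [PySem.Set.mem_add, List.mem_cons]
      constructor
      · rintro ((hx | rfl) | ⟨l, hl, hlr, hx⟩ | ⟨hx, hnr⟩)
        · exact Or.inl hx
        · exact Or.inr (Or.inr ⟨Or.inl rfl, h⟩)
        · exact Or.inr (Or.inl ⟨l, Or.inr hl, hlr, hx⟩)
        · exact Or.inr (Or.inr ⟨Or.inr hx, hnr⟩)
      · rintro (hx | ⟨l, (rfl | hl), hlr, hx⟩ | ⟨(rfl | hx), hnr⟩)
        · exact Or.inl (Or.inl hx)
        · exact absurd hlr h
        · exact Or.inr (Or.inl ⟨l, hl, hlr, hx⟩)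
        · exact Or.inl (Or.inr rfl)
        · exact Or.inr (Or.inr ⟨hx, hnr⟩)

theorem innerA_fst_congr (row : List Int) (s : List Int) (t : PySem.Set Int) (c c' : Int) :
    (s.foldl (innerA row) (t, c)).1 = (s.foldl (innerA row) (t, c')).1 := by
  induction s generalizing t c c' with
  | nil => rfl
  | cons y ys ih =>
    simp only [List.foldl_cons]
    by_cases h : y ∈ row
    · rw [show innerA row (t, c) y = (PySem.Set.update t [y - 1, y + 1], c + 1) by
        simp [innerA, h],
        show innerA row (t, c') y = (PySem.Set.update t [y - 1, y + 1], c' + 1) by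
        simp [innerA, h]]
      exact ih _ _ _
    · rw [show innerA row (t, c) y = (PySem.Set.add t y, c) by simp [innerA, h],
        show innerA row (t, c') y = (PySem.Set.add t y, c') by simp [innerA, h]]
      exact ih _ _ _

theorem F_nodup (start : Int) (splitters : List (List Int)) (i : Nat) :
    (F start splitters i).Nodup := by
  induction i with
  | zero => exact PySem.Set.nodup_ofList _
  | succ i _ => exact innerA_fst_nodup _ _ _ List.nodup_nil

theorem mem_F_succ (start : Int) (splitters : List (List Int)) (i : Nat) (x : Int) :
    x ∈ F start splitters (i + 1)
      ↔ (∃ loc ∈ F start splitters i, loc ∈ rowOf splitters i ∧ (x = loc - 1 ∨ x = loc + 1))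
          ∨ (x ∈ F start splitters i ∧ x ∉ rowOf splitters i) := by
  show x ∈ ((F start splitters i).foldl (innerA (rowOf splitters i)) (PySem.Set.empty, 0)).1 ↔ _
  rw [innerA_fst_mem]
  simp [PySem.Set.empty]

theorem foldA_general (start : Int) (splitters : List (List Int)) :
    ∀ (m k : Nat) (c : Int), k + m = splitters.length →
      ((splitters.drop k).foldl stepA (F start splitters k, c)).2
        = c + ((List.range' k m).map (hits start splitters)).sum := by
  intro m
  induction m with
  | zero =>
    intro k c hk
    have hk' : k = splitters.length := by omega
    subst hk'
    simp
  | succ m ih =>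
    intro k c hk
    have hklt : k < splitters.length := by omega
    rw [List.drop_eq_getElem_cons hklt, List.foldl_cons]
    have hrow : rowOf splitters k = splitters[k] := List.getD_eq_getElem _ _ hklt
    have hstep : stepA (F start splitters k, c) splitters[k]
        = (F start splitters (k + 1), c + hits start splitters k) := by
      have h1 : (stepA (F start splitters k, c) splitters[k]).1
          = F start splitters (k + 1) := by
        show ((F start splitters k).foldl (innerA splitters[k]) (PySem.Set.empty, c)).1 = _
        rw [innerA_fst_congr _ _ _ c 0]
        show _ = (stepA (F start splitters k, 0) (rowOf splitters k)).1
        rw [hrow]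
        rfl
      have h2 : (stepA (F start splitters k, c) splitters[k]).2
          = c + hits start splitters k := by
        show ((F start splitters k).foldl (innerA splitters[k]) (PySem.Set.empty, c)).2 = _
        rw [innerA_snd]
        simp [hits, hrow]
      exact Prod.ext h1 h2
    rw [hstep, ih (k + 1) (c + hits start splitters k) (by omega), List.range'_succ]
    simp
    ring

theorem dayA_eq_sum (start : Int) (splitters : List (List Int)) :
    day7_part1 start splitters
      = ((List.range splitters.length).map (hits start splitters)).sum := by
  have := foldA_general start splitters splitters.length 0 0 (by omega)
  simp only [List.drop_zero] at this
  show (splitters.foldl stepA (F start splitters 0, 0)).2 = _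
  rw [this, List.range_eq_range']
  simp

-- ---- RR lemmas ----
theorem mem_RR (start : Int) (splitters : List (List Int)) (u : Nat × Int) :
    u ∈ RR start splitters ↔ u.1 ≤ splitters.length ∧ u.2 ∈ F start splitters u.1 := by
  obtain ⟨i, loc⟩ := u
  simp only [RR, List.mem_flatMap, List.mem_range, List.mem_map]
  constructor
  · rintro ⟨j, hj, loc', hloc', heq⟩
    injection heq with h1 h2
    subst h1; subst h2
    exact ⟨by omega, hloc'⟩
  · rintro ⟨hi, hloc⟩
    exact ⟨i, by omega, loc, hloc, rfl⟩

theorem RR_nodup (start : Int) (splitters : List (List Int)) : (RR start splitters).Nodup := by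
  have key : ∀ m : Nat,
      ((List.range m).flatMap (fun i => (F start splitters i).map (fun loc => (i, loc)))).Nodup := by
    intro m
    induction m with
    | zero => simp
    | succ m ih =>
      rw [List.range_succ, List.flatMap_append]
      rw [List.nodup_append']
      refine ⟨ih, ?_, ?_⟩
      · simp only [List.flatMap_cons, List.flatMap_nil, List.append_nil]
        exact (F_nodup start splitters m).map (fun a b h => by
          simpa using congrArg Prod.snd h)
      · intro u hu hu'
        simp only [List.mem_flatMap, List.mem_range, List.mem_map] at hu
        simp only [List.flatMap_cons, List.flatMap_nil, List.append_nil, List.mem_map] at hu'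
        obtain ⟨j, hj, loc, _, rfl⟩ := hu
        obtain ⟨loc', _, heq⟩ := hu'
        have := congrArg Prod.fst heq
        simp at this
        omega
  exact key (splitters.length + 1)

theorem succs_sub_RR (start : Int) (splitters : List (List Int)) (u v : Nat × Int)
    (hu : u ∈ RR start splitters) (hv : v ∈ succs splitters u) : v ∈ RR start splitters := by
  obtain ⟨i, loc⟩ := u
  rw [mem_RR] at hu
  obtain ⟨hi, hloc⟩ := hu
  simp only [succs] at hv
  by_cases hlt : i < splitters.length
  · rw [if_pos hlt] at hv
    by_cases hr : loc ∈ rowOf splitters i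
    · rw [if_pos hr] at hv
      simp only [List.mem_cons, List.not_mem_nil, or_false] at hv
      rcases hv with rfl | rfl <;>
        · rw [mem_RR]
          refine ⟨by omega, ?_⟩
          rw [mem_F_succ]
          exact Or.inl ⟨loc, hloc, hr, by simp⟩
    · rw [if_neg hr] at hv
      simp only [List.mem_cons, List.not_mem_nil, or_false] at hv
      subst hv
      rw [mem_RR]
      refine ⟨by omega, ?_⟩
      rw [mem_F_succ]
      exact Or.inr ⟨hloc, hr⟩
  · rw [if_neg hlt] at hv
    exact absurd hv (List.not_mem_nil)

theorem F_bounds (start : Int) (splitters : List (List Int)) (i : Nat) :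
    ∀ x ∈ F start splitters i, start - (i : Int) ≤ x ∧ x ≤ start + (i : Int) := by
  induction i with
  | zero =>
    intro x hx
    have : x ∈ [start] := hx
    simp at this
    subst this
    simp
  | succ i ih =>
    intro x hx
    rw [mem_F_succ] at hx
    push_cast
    rcases hx with ⟨loc, hloc, _, hx⟩ | ⟨hx, _⟩
    · have := ih loc hloc
      rcases hx with rfl | rfl <;> push_cast at this ⊢ <;> omega
    · have := ih x hx
      push_cast at this ⊢
      omega

theorem F_length_le (start : Int) (splitters : List (List Int)) (i : Nat) :
    (F start splitters i).length ≤ 2 * i + 1 := by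
  have hsub : F start splitters i ⊆ PySem.List.pyRange (start - i) (start + i + 1) 1 := by
    intro x hx
    rw [PySem.List.mem_pyRange_one]
    have := F_bounds start splitters i x hx
    omega
  have hle := (List.Nodup.subperm (F_nodup start splitters i) hsub).length_le
  rw [PySem.List.length_pyRange_one] at hle
  have heq : (start + (i : Int) + 1) - (start - (i : Int)) = 2 * (i : Int) + 1 := by ring
  rw [heq] at hle
  omega

theorem RR_length_le (start : Int) (splitters : List (List Int)) :
    (RR start splitters).length ≤ (splitters.length + 1) * (splitters.length + 1) := by
  rw [RR, List.length_flatMap]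
  have key : ∀ m : Nat,
      ((List.range m).map (fun i => ((F start splitters i).map (fun loc => (i, loc))).length)).sum
        ≤ m * m := by
    intro m
    induction m with
    | zero => simp
    | succ m ih =>
      rw [List.range_succ, List.map_append, List.sum_append]
      have h1 : ((F start splitters m).map (fun loc => (m, loc))).length ≤ 2 * m + 1 := by
        rw [List.length_map]
        exact F_length_le start splitters m
      have h2 : (m + 1) * (m + 1) = m * m + (2 * m + 1) := by ring
      simp only [List.map_cons, List.map_nil, List.sum_cons, List.sum_nil, add_zero]
      omega
  exact key (splitters.length + 1)

-- ---- generic list lemmas ----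
theorem nodup_subset_length {α : Type} [DecidableEq α] (l1 l2 : List α)
    (h1 : l1.Nodup) (hsub : ∀ x ∈ l1, x ∈ l2) : l1.length ≤ l2.length := by
  exact (List.Nodup.subperm h1 hsub).length_le

theorem sum_filter_split {α : Type} [DecidableEq α] (w : α → Int) :
    ∀ (R : List α), R.Nodup → ∀ u ∈ R, ∀ p q : α → Bool, p u = true →
      (∀ x, q x = (p x && decide (x ≠ u))) →
      ((R.filter p).map w).sum = w u + ((R.filter q).map w).sum := by
  intro R
  induction R with
  | nil => intro _ u hu; exact absurd hu (List.not_mem_nil)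
  | cons a R ih =>
    intro hnd u hu p q hpu hq
    obtain ⟨ha, hndR⟩ := List.nodup_cons.1 hnd
    rcases List.mem_cons.1 hu with rfl | huR
    · rw [List.filter_cons, if_pos hpu, List.filter_cons]
      have hqa : q u = false := by rw [hq]; simp
      rw [if_neg (by simp [hqa])]
      have : R.filter p = R.filter q := by
        apply List.filter_congr
        intro x hx
        rw [hq]
        have : x ≠ u := fun h => ha (h ▸ hx)
        simp [this]
      rw [this]
      simp
    · have hau : a ≠ u := fun h => ha (h ▸ huR)
      have hqa : q a = p a := by rw [hq]; simp [hau]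
      rw [List.filter_cons, List.filter_cons, hqa]
      by_cases hpa : p a = true
      · rw [if_pos hpa, if_pos hpa]
        simp only [List.map_cons, List.sum_cons]
        rw [ih hndR u huR p q hpu hq]
        ring
      · rw [if_neg hpa, if_neg hpa]
        exact ih hndR u huR p q hpu hq

-- ---- completeness of a closed seen-set ----
theorem closed_complete (start : Int) (splitters : List (List Int)) (seen : List (Nat × Int))
    (hclo : ∀ u ∈ seen, ∀ v ∈ succs splitters u, v ∈ seen)
    (hroot : ((0 : Nat), start) ∈ seen) :
    ∀ u ∈ RR start splitters, u ∈ seen := by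
  have key : ∀ i : Nat, i ≤ splitters.length →
      ∀ loc ∈ F start splitters i, ((i : Nat), loc) ∈ seen := by
    intro i
    induction i with
    | zero =>
      intro _ loc hloc
      have : loc ∈ [start] := hloc
      simp at this
      subst this
      exact hroot
    | succ i ih =>
      intro hi x hx
      rw [mem_F_succ] at hx
      rcases hx with ⟨loc, hloc, hr, hxe⟩ | ⟨hx, hr⟩
      · have hs := ih (by omega) loc hloc
        have hv : ((i + 1 : Nat), x) ∈ succs splitters (i, loc) := by
          simp only [succs]
          rw [if_pos (show i < splitters.length by omega), if_pos hr]
          rcases hxe with rfl | rfl <;> simp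
        exact hclo _ hs _ hv
      · have hs := ih (by omega) x hx
        have hv : ((i + 1 : Nat), x) ∈ succs splitters (i, x) := by
          simp only [succs]
          rw [if_pos (show i < splitters.length by omega), if_neg hr]
          simp
        exact hclo _ hs _ hv
  intro u hu
  obtain ⟨i, loc⟩ := u
  rw [mem_RR] at hu
  exact key i hu.1 loc hu.2

theorem rem_zero (start : Int) (splitters : List (List Int)) (seen : List (Nat × Int))
    (hall : ∀ u ∈ RR start splitters, u ∈ seen) : rem start splitters seen = 0 := by
  have : (RR start splitters).filter (fun u => decide (u ∉ seen)) = [] := by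
    rw [List.filter_eq_nil_iff]
    intro u hu
    simp [hall u hu]
  rw [rem, this]
  simp

-- ---- main loop lemma ----
theorem altLoop_correct (start : Int) (splitters : List (List Int)) :
    ∀ (fuel : Nat) (stack : List (Nat × Int)) (seen : PySem.Set (Nat × Int)) (count : Int),
      LoopInv start splitters stack seen →
      2 * ((RR start splitters).length - seen.length) + stack.length ≤ fuel →
      altLoop (splitters.map (fun row => PySem.Set.ofList row)) fuel stack seen count
        = count + rem start splitters seen := by
  intro fuel
  induction fuel with
  | zero =>
    intro stack seen count hInv hm
    obtain ⟨hseenRR, _, _, _, hnd⟩ := hInv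
    have hall : ∀ u ∈ RR start splitters, u ∈ seen := by
      by_contra hh
      simp only [not_forall] at hh
      obtain ⟨u, hu, hnot⟩ := hh
      have hnd2 : (seen ++ [u]).Nodup := by
        rw [List.nodup_append']
        refine ⟨hnd, List.nodup_singleton u, ?_⟩
        intro x hx hx'
        simp at hx'
        subst hx'
        exact hnot hx
      have hsub2 : ∀ x ∈ seen ++ [u], x ∈ RR start splitters := by
        intro x hx
        rcases List.mem_append.1 hx with h | h
        · exact hseenRR x h
        · simp at h; subst h; exact hu
      have := nodup_subset_length _ _ hnd2 hsub2
      simp at this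
      omega
    rw [rem_zero start splitters seen hall]
    simp [altLoop]
  | succ fuel ih =>
    intro stack seen count hInv hm
    obtain ⟨hseenRR, hstackRR, hclo, hroot, hnd⟩ := hInv
    cases stack with
    | nil =>
      have hclo' : ∀ u ∈ seen, ∀ v ∈ succs splitters u, v ∈ seen := by
        intro u hu v hv
        rcases hclo u hu v hv with h | h
        · exact h
        · exact absurd h (List.not_mem_nil)
      have hroot' : ((0 : Nat), start) ∈ seen := by
        rcases hroot with h | h
        · exact h
        · exact absurd h (List.not_mem_nil)
      rw [rem_zero start splitters seen
        (closed_complete start splitters seen hclo' hroot')]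
      simp [altLoop]
    | cons hd rest =>
      obtain ⟨i, loc⟩ := hd
      by_cases hmem : (i, loc) ∈ seen
      · have hstep : altLoop (splitters.map fun row => PySem.Set.ofList row) (fuel + 1)
            ((i, loc) :: rest) seen count
            = altLoop (splitters.map fun row => PySem.Set.ofList row) fuel rest seen count := by
          simp only [altLoop]
          rw [if_pos hmem]
        rw [hstep]
        refine ih rest seen count ⟨hseenRR, ?_, ?_, ?_, hnd⟩ ?_
        · exact fun u hu => hstackRR u (List.mem_cons_of_mem _ hu)
        · intro u hu v hv
          rcases hclo u hu v hv with h | h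
          · exact Or.inl h
          · rcases List.mem_cons.1 h with rfl | h2
            · exact Or.inl hmem
            · exact Or.inr h2
        · rcases hroot with h | h
          · exact Or.inl h
          · rcases List.mem_cons.1 h with heq | h2
            · exact Or.inl (by rw [heq]; exact hmem)
            · exact Or.inr h2
        · simp only [List.length_cons] at hm
          omega
      · have huRR : (i, loc) ∈ RR start splitters := hstackRR _ (by simp)
        have hadd : PySem.Set.add seen (i, loc) = seen ++ [(i, loc)] :=
          PySem.Set.add_of_not_mem hmem
        have hnd' : (seen ++ [(i, loc)]).Nodup := by
          rw [List.nodup_append']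
          refine ⟨hnd, List.nodup_singleton _, ?_⟩
          intro x hx hx'
          simp at hx'
          subst hx'
          exact hmem hx
        have hseenRR' : ∀ u ∈ seen ++ [(i, loc)], u ∈ RR start splitters := by
          intro u hu
          rcases List.mem_append.1 hu with h | h
          · exact hseenRR u h
          · simp at h; subst h; exact huRR
        have hlen' : seen.length + 1 ≤ (RR start splitters).length := by
          have := nodup_subset_length _ _ hnd' hseenRR'
          simp at this
          omega
        have hsplit : rem start splitters seen
            = wt splitters (i, loc) + rem start splitters (seen ++ [(i, loc)]) := by
          refine sum_filter_split (wt splitters) (RR start splitters)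
            (RR_nodup start splitters) (i, loc) huRR _ _ (by simp [hmem]) ?_
          intro x
          by_cases h1 : x ∈ seen <;> by_cases h2 : x = (i, loc) <;> simp [h1, h2]
        have hrl : (splitters.map fun row => PySem.Set.ofList row).length
            = splitters.length := List.length_map _
        by_cases hlt : i < splitters.length
        · have hltr : i < (splitters.map fun row => PySem.Set.ofList row).length := by
            rw [hrl]; exact hlt
          have hrowmem :
              (loc ∈ (splitters.map fun row => PySem.Set.ofList row).getD i PySem.Set.empty)
                ↔ loc ∈ rowOf splitters i := by
            rw [List.getD_eq_getElem _ _ hltr]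
            simp only [List.getElem_map, PySem.Set.mem_ofList]
            rw [rowOf, List.getD_eq_getElem _ _ hlt]
          by_cases hr : loc ∈ rowOf splitters i
          · have hstep : altLoop (splitters.map fun row => PySem.Set.ofList row) (fuel + 1)
                ((i, loc) :: rest) seen count
                = altLoop (splitters.map fun row => PySem.Set.ofList row) fuel
                    ((i + 1, loc + 1) :: (i + 1, loc - 1) :: rest)
                    (PySem.Set.add seen (i, loc)) (count + 1) := by
              simp only [altLoop]
              rw [if_neg hmem, if_pos hltr, if_pos (hrowmem.2 hr)]
            rw [hstep, hadd]
            have hsuc : succs splitters (i, loc) = [(i + 1, loc - 1), (i + 1, loc + 1)] := by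
              simp only [succs]
              rw [if_pos hlt, if_pos hr]
            have hInv' : LoopInv start splitters
                ((i + 1, loc + 1) :: (i + 1, loc - 1) :: rest) (seen ++ [(i, loc)]) := by
              refine ⟨hseenRR', ?_, ?_, ?_, hnd'⟩
              · intro u hu
                rcases List.mem_cons.1 hu with rfl | hu2
                · exact succs_sub_RR start splitters _ _ huRR (by rw [hsuc]; simp)
                rcases List.mem_cons.1 hu2 with rfl | hu3
                · exact succs_sub_RR start splitters _ _ huRR (by rw [hsuc]; simp)
                · exact hstackRR u (List.mem_cons_of_mem _ hu3)
              · intro u hu v hv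
                rcases List.mem_append.1 hu with hu1 | hu1
                · rcases hclo u hu1 v hv with h | h
                  · exact Or.inl (List.mem_append.2 (Or.inl h))
                  · rcases List.mem_cons.1 h with rfl | h2
                    · exact Or.inl (by simp)
                    · exact Or.inr (by simp [h2])
                · simp at hu1
                  subst hu1
                  rw [hsuc] at hv
                  rcases List.mem_cons.1 hv with rfl | hv2
                  · exact Or.inr (by simp)
                  · simp at hv2
                    subst hv2
                    exact Or.inr (by simp)
              · rcases hroot with h | h
                · exact Or.inl (by simp [h])
                · rcases List.mem_cons.1 h with heq | h2
                  · exact Or.inl (by rw [heq]; simp)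
                  · exact Or.inr (by simp [h2])
            refine (ih _ _ _ hInv' ?_).trans ?_
            · simp only [List.length_cons, List.length_append, List.length_nil] at hm ⊢
              omega
            · rw [hsplit]
              have hwt : wt splitters (i, loc) = 1 := by simp [wt, hlt, hr]
              rw [hwt]
              ring
          · have hstep : altLoop (splitters.map fun row => PySem.Set.ofList row) (fuel + 1)
                ((i, loc) :: rest) seen count
                = altLoop (splitters.map fun row => PySem.Set.ofList row) fuel
                    ((i + 1, loc) :: rest) (PySem.Set.add seen (i, loc)) count := by
              simp only [altLoop]
              rw [if_neg hmem, if_pos hltr, if_neg (fun hc => hr (hrowmem.1 hc))]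
            rw [hstep, hadd]
            have hsuc : succs splitters (i, loc) = [(i + 1, loc)] := by
              simp only [succs]
              rw [if_pos hlt, if_neg hr]
            have hInv' : LoopInv start splitters ((i + 1, loc) :: rest) (seen ++ [(i, loc)]) := by
              refine ⟨hseenRR', ?_, ?_, ?_, hnd'⟩
              · intro u hu
                rcases List.mem_cons.1 hu with rfl | hu2
                · exact succs_sub_RR start splitters _ _ huRR (by rw [hsuc]; simp)
                · exact hstackRR u (List.mem_cons_of_mem _ hu2)
              · intro u hu v hv
                rcases List.mem_append.1 hu with hu1 | hu1
                · rcases hclo u hu1 v hv with h | h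
                  · exact Or.inl (List.mem_append.2 (Or.inl h))
                  · rcases List.mem_cons.1 h with rfl | h2
                    · exact Or.inl (by simp)
                    · exact Or.inr (by simp [h2])
                · simp at hu1
                  subst hu1
                  rw [hsuc] at hv
                  simp at hv
                  subst hv
                  exact Or.inr (by simp)
              · rcases hroot with h | h
                · exact Or.inl (by simp [h])
                · rcases List.mem_cons.1 h with heq | h2
                  · exact Or.inl (by rw [heq]; simp)
                  · exact Or.inr (by simp [h2])
            refine (ih _ _ _ hInv' ?_).trans ?_
            · simp only [List.length_cons, List.length_append, List.length_nil] at hm ⊢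
              omega
            · rw [hsplit]
              have hwt : wt splitters (i, loc) = 0 := by simp [wt, hr]
              rw [hwt]
              ring
        · have hstep : altLoop (splitters.map fun row => PySem.Set.ofList row) (fuel + 1)
              ((i, loc) :: rest) seen count
              = altLoop (splitters.map fun row => PySem.Set.ofList row) fuel rest
                  (PySem.Set.add seen (i, loc)) count := by
            simp only [altLoop]
            rw [if_neg hmem, if_neg (by rw [hrl]; exact hlt)]
          rw [hstep, hadd]
          have hsucnil : succs splitters (i, loc) = [] := by
            simp only [succs]
            rw [if_neg hlt]
          have hInv' : LoopInv start splitters rest (seen ++ [(i, loc)]) := by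
            refine ⟨hseenRR', ?_, ?_, ?_, hnd'⟩
            · exact fun u hu => hstackRR u (List.mem_cons_of_mem _ hu)
            · intro u hu v hv
              rcases List.mem_append.1 hu with hu1 | hu1
              · rcases hclo u hu1 v hv with h | h
                · exact Or.inl (List.mem_append.2 (Or.inl h))
                · rcases List.mem_cons.1 h with rfl | h2
                  · exact Or.inl (by simp)
                  · exact Or.inr h2
              · simp at hu1
                subst hu1
                rw [hsucnil] at hv
                exact absurd hv (List.not_mem_nil)
            · rcases hroot with h | h
              · exact Or.inl (by simp [h])
              · rcases List.mem_cons.1 h with heq | h2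
                · exact Or.inl (by rw [heq]; simp)
                · exact Or.inr h2
          refine (ih _ _ _ hInv' ?_).trans ?_
          · simp only [List.length_cons, List.length_append, List.length_nil] at hm ⊢
            omega
          · rw [hsplit]
            have hwt : wt splitters (i, loc) = 0 := by simp [wt, hlt]
            rw [hwt]
            ring

theorem sum_map_flatMap {α β : Type} (w : β → Int) (f : α → List β) (l : List α) :
    ((l.flatMap f).map w).sum = (l.map (fun a => ((f a).map w).sum)).sum := by
  induction l with
  | nil => simp
  | cons a l ih => simp [List.flatMap_cons, List.map_append, List.sum_append, ih]

theorem sum_indicator (r : List Int) (l : List Int) :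
    (l.map (fun loc => if loc ∈ r then (1 : Int) else 0)).sum
      = ((l.filter (fun loc => r.contains loc)).length : Int) := by
  induction l with
  | nil => simp
  | cons x l ih =>
    by_cases h : x ∈ r
    · simp only [List.map_cons, List.sum_cons, if_pos h, List.filter_cons]
      rw [if_pos (by simpa using h), ih]
      simp only [List.length_cons]
      push_cast
      ring
    · simp only [List.map_cons, List.sum_cons, if_neg h, List.filter_cons]
      rw [if_neg (by simpa using h), ih]
      ring

theorem level_sum (start : Int) (splitters : List (List Int)) (i : Nat) :
    ((F start splitters i).map (fun loc => wt splitters (i, loc))).sum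
      = if i < splitters.length then hits start splitters i else 0 := by
  by_cases hi : i < splitters.length
  · rw [if_pos hi]
    have hmap : (F start splitters i).map (fun loc => wt splitters (i, loc))
        = (F start splitters i).map (fun loc => if loc ∈ rowOf splitters i then (1 : Int) else 0) := by
      apply List.map_eq_map_iff.mpr
      intro loc _
      simp [wt, hi]
    rw [hmap, sum_indicator]
    rfl
  · rw [if_neg hi]
    have hmap : (F start splitters i).map (fun loc => wt splitters (i, loc))
        = (F start splitters i).map (fun _ => (0 : Int)) := by
      apply List.map_eq_map_iff.mpr
      intro loc _
      simp [wt, hi]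
    rw [hmap]
    simp

theorem sum_RR_wt (start : Int) (splitters : List (List Int)) :
    ((RR start splitters).map (wt splitters)).sum
      = ((List.range splitters.length).map (hits start splitters)).sum := by
  rw [RR, sum_map_flatMap]
  have hcomp : ∀ i : Nat,
      (((F start splitters i).map (fun loc => (i, loc))).map (wt splitters)).sum
        = if i < splitters.length then hits start splitters i else 0 := by
    intro i
    rw [List.map_map]
    exact level_sum start splitters i
  have hmap : (List.range (splitters.length + 1)).map
        (fun i => (((F start splitters i).map (fun loc => (i, loc))).map (wt splitters)).sum)
      = (List.range (splitters.length + 1)).map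
        (fun i => if i < splitters.length then hits start splitters i else 0) := by
    apply List.map_eq_map_iff.mpr
    intro i _
    exact hcomp i
  rw [hmap, List.range_succ, List.map_append, List.sum_append]
  have hlast : ([splitters.length].map
      (fun i => if i < splitters.length then hits start splitters i else 0)).sum = 0 := by
    simp
  rw [hlast, add_zero]
  congr 1
  apply List.map_eq_map_iff.mpr
  intro i hi
  rw [List.mem_range] at hi
  rw [if_pos hi]

theorem dayB_eq_sum (start : Int) (splitters : List (List Int)) :
    day7_part1_alt start splitters
      = ((List.range splitters.length).map (hits start splitters)).sum := by
  have hInv0 : LoopInv start splitters [((0 : Nat), start)] PySem.Set.empty := by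
    refine ⟨?_, ?_, ?_, ?_, List.nodup_nil⟩
    · intro u hu
      exact absurd hu (List.not_mem_nil)
    · intro u hu
      simp at hu
      subst hu
      rw [mem_RR]
      exact ⟨by omega, by simp [F, PySem.Set.mem_ofList]⟩
    · intro u hu
      exact absurd hu (List.not_mem_nil)
    · exact Or.inr (by simp)
  have hmeas : 2 * ((RR start splitters).length - (PySem.Set.empty : PySem.Set (Nat × Int)).length)
      + ([((0 : Nat), start)] : List (Nat × Int)).length
      ≤ 2 * ((splitters.length + 1) * (splitters.length + 1)) + 1 := by
    have := RR_length_le start splitters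
    simp only [PySem.Set.empty, List.length_nil, List.length_cons, Nat.sub_zero]
    omega
  show altLoop (splitters.map fun row => PySem.Set.ofList row)
      (2 * ((splitters.length + 1) * (splitters.length + 1)) + 1)
      [((0 : Nat), start)] PySem.Set.empty 0 = _
  rw [altLoop_correct start splitters _ _ _ _ hInv0 hmeas]
  have hrem : rem start splitters PySem.Set.empty
      = ((RR start splitters).map (wt splitters)).sum := by
    rw [rem]
    congr 1
    rw [List.filter_eq_self.mpr]
    intro u _
    simp [PySem.Set.empty]
  rw [hrem, sum_RR_wt]
  ring

-- ===== VERDICT (by name: the statement is the Claim_ definition above) =====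
theorem day7_part1_spec : Claim_equal_day7_part1 := by
  intro start splitters _
  show day7_part1 start splitters = day7_part1_alt start splitters
  rw [dayA_eq_sum, dayB_eq_sum]
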